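-- pv_equiv track=rewrite | github.com/ci5437-ene-mar-2018/proyecto-3-liay | proyecto-3/nonogram_solver/generator.py | addUnicityRules
-- ===== SOURCE A (Python) =====
-- def addUnicityRules(rulesList, realLastVar):
-- 	counter = 0
--
-- 	for block in rulesList:
-- 		for rule in block:
-- 			if rule >= 0 and rule > realLastVar:
-- 				# Unicity Rules
-- 				for rule2 in block:
-- 					if rule != rule2 and rule2 > realLastVar:
-- 						block[rule].append(-rule2)
--
-- 				counter += len(block[rule])
--
-- 			else:
-- 				counter += 1
--
-- 	return counter
-- ===== SOURCE B (Python) =====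
-- def addUnicityRules(rulesList, realLastVar):
--     # Counting-only reformulation: A mutates the blocks' lists in place; this B
--     # computes the same return value arithmetically without mutating anything.
--     counter = 0
--     for block in rulesList:
--         m = sum(1 for k in block if k > realLastVar)
--         for key, lst in block.items():
--             if key >= 0 and key > realLastVar:
--                 counter += len(lst) + m - 1
--             else:
--                 counter += 1
--     return counter
-- ===== Notes on version B (the rewrite author's own statement) =====
-- stated objective: simpler
-- what changed: Instead of mutating each block's lists in place (appending one negated peer per qualifying key pair) and then measuring the grown lists, B counts the keys > realLastVar once per block (m) and adds len(lst)+m-1 per qualifying key arithmetically, with no mutation at all; equivalence is about the return value only (A mutates the blocks, B does not).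
import Mathlib
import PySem

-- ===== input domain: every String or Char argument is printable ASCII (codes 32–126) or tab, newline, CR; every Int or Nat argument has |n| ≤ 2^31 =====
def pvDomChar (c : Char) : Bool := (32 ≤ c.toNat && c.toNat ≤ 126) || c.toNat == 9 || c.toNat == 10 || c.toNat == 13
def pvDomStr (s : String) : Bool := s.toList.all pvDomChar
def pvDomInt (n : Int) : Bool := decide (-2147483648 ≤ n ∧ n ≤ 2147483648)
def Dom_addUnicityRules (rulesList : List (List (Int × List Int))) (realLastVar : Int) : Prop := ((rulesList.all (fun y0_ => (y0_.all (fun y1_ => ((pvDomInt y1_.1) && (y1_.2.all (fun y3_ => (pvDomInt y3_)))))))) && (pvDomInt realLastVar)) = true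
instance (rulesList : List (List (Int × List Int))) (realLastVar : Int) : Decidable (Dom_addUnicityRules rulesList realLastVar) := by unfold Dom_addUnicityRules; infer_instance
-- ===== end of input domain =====

-- B replaces A's in-place list mutation and re-measurement by a one-pass arithmetic count
-- (per block: m keys > realLastVar; each qualifying key contributes len(lst)+m-1); simpler, and
-- the equivalence proved here is about the RETURN value only — A mutates the blocks, B does not.


-- ===== PORT A =====
-- literal transliteration: each block is a Python dict (insertion-ordered); iterating a dict
-- yields its keys; block[rule].append(-rule2) is Dict.modify at key rule; counter += len(block[rule])
-- reads the grown list after the inner loop.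
def addUnicityRules (rulesList : List (List (Int × List Int))) (realLastVar : Int) : Int :=
  rulesList.foldl (fun counter block =>
    let keys := block.map Prod.fst
    (keys.foldl (fun (st : Int × PySem.Dict Int (List Int)) rule =>
      if rule ≥ 0 ∧ rule > realLastVar then
        -- Unicity Rules
        let blk := keys.foldl (fun blk rule2 =>
            if rule ≠ rule2 ∧ rule2 > realLastVar then
              blk.modify rule [] (fun l => l ++ [-rule2])
            else blk) st.2
        (st.1 + ((blk.getD rule []).length : Int), blk)
      else (st.1 + 1, st.2)) (counter, PySem.Dict.mk block)).1) 0

-- ===== PORT B =====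
-- transliteration of Source B: m = number of keys > realLastVar in the block; each qualifying
-- key adds len(lst) + m - 1, every other key adds 1; nothing is mutated.
def addUnicityRules_alt (rulesList : List (List (Int × List Int))) (realLastVar : Int) : Int :=
  rulesList.foldl (fun counter block =>
    let m : Int := ((block.map Prod.fst).filter (fun k => decide (k > realLastVar))).length
    block.foldl (fun counter kv =>
      if kv.1 ≥ 0 ∧ kv.1 > realLastVar then
        counter + (kv.2.length : Int) + m - 1
      else counter + 1) counter) 0

-- ===== PRECONDITION & SPEC =====
-- Pre_ only requires each association list to be a valid representation of a Python dict
-- (pairwise-distinct keys); every input the Python function can actually receive satisfies it.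
def Pre_addUnicityRules (rulesList : List (List (Int × List Int))) (realLastVar : Int) : Prop :=
  ∀ block ∈ rulesList, (block.map Prod.fst).Nodup
instance (rulesList : List (List (Int × List Int))) (realLastVar : Int) : Decidable (Pre_addUnicityRules rulesList realLastVar) := by unfold Pre_addUnicityRules; infer_instance
def pvWitness_addUnicityRules : (List (List (Int × List Int))) × Int :=
  ([[(1, [5, -2]), (2, [])], [(-1, [3])]], 0)

def Spec_addUnicityRules (rulesList : List (List (Int × List Int))) (realLastVar : Int) (out : Int) : Prop := out = addUnicityRules_alt rulesList realLastVar
instance (rulesList : List (List (Int × List Int))) (realLastVar : Int) (out : Int) : Decidable (Spec_addUnicityRules rulesList realLastVar out) := by unfold Spec_addUnicityRules; infer_instance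

-- ===== CLAIM (what is proved, stated in full; the proofs are below) =====
def Claim_equal_addUnicityRules : Prop := ∀ (rulesList : List (List (Int × List Int))) (realLastVar : Int), Dom_addUnicityRules rulesList realLastVar → Pre_addUnicityRules rulesList realLastVar → Spec_addUnicityRules rulesList realLastVar (addUnicityRules rulesList realLastVar)

-- ===== LEMMAS AND PROOFS =====

-- The inner loop appends one element to the entry at `rule` for each rule2 in ks with
-- rule ≠ rule2 ∧ rule2 > v.
theorem pv_inner_getD (v rule : Int) (ks : List Int) (blk : PySem.Dict Int (List Int)) :
    ((ks.foldl (fun blk rule2 =>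
        if rule ≠ rule2 ∧ rule2 > v then blk.modify rule [] (fun l => l ++ [-rule2]) else blk)
      blk).getD rule [])
    = blk.getD rule [] ++ (ks.filter (fun r2 => decide (rule ≠ r2 ∧ r2 > v))).map (fun r2 => -r2) := by
  induction ks generalizing blk with
  | nil => simp
  | cons a t ih =>
    by_cases h : rule ≠ a ∧ a > v
    · simp [List.foldl_cons, h, ih, PySem.Dict.getD_modify_self]
    · simp [List.foldl_cons, h, ih]

-- The inner loop does not touch entries at keys other than `rule`.
theorem pv_inner_getD_ne (v rule k : Int) (hk : k ≠ rule) (ks : List Int)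
    (blk : PySem.Dict Int (List Int)) :
    ((ks.foldl (fun blk rule2 =>
        if rule ≠ rule2 ∧ rule2 > v then blk.modify rule [] (fun l => l ++ [-rule2]) else blk)
      blk).getD k [])
    = blk.getD k [] := by
  induction ks generalizing blk with
  | nil => rfl
  | cons a t ih =>
    by_cases h : rule ≠ a ∧ a > v
    · simp only [List.foldl_cons, if_pos h, ih, PySem.Dict.getD_modify_of_ne _ _ _ hk]
    · simp only [List.foldl_cons, if_neg h, ih]

-- For rule > v, the inner-loop candidate count is (#keys > v) minus rule's multiplicity.
theorem pv_filter_count (v rule : Int) (hr : rule > v) (ks : List Int) :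
    ((ks.filter (fun r2 => decide (rule ≠ r2 ∧ r2 > v))).length : Int)
    = ((ks.filter (fun r2 => decide (r2 > v))).length : Int) - ks.count rule := by
  induction ks with
  | nil => simp
  | cons a t ih =>
    by_cases ha : rule = a
    · subst ha
      simp only [List.filter_cons, List.count_cons, beq_self_eq_true]
      have h1 : (decide (rule ≠ rule ∧ rule > v)) = false := by simp
      have h2 : (decide (rule > v)) = true := by simpa using hr
      simp only [h1, h2, if_true, Bool.false_eq_true, if_false, List.length_cons]
      push_cast; omega
    · have hc : (a == rule) = false := by simpa using fun e => ha e.symm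
      by_cases hv : a > v
      · have h1 : (decide (rule ≠ a ∧ a > v)) = true := by simp [ha, hv]
        have h2 : (decide (a > v)) = true := by simpa using hv
        simp only [List.filter_cons, List.count_cons, h1, h2, if_true, List.length_cons, hc,
          Bool.false_eq_true, if_false]
        push_cast at ih ⊢; omega
      · have h1 : (decide (rule ≠ a ∧ a > v)) = false := by simp [hv]
        have h2 : (decide (a > v)) = false := by simpa using hv
        simp only [List.filter_cons, List.count_cons, h1, h2, Bool.false_eq_true, if_false, hc]
        simpa using ih

-- A's per-block loop, folded over a pending key list whose entries are still untouched in blk,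
-- equals an arithmetic accumulation over the pending pairs.
theorem pv_block (v : Int) (keys : List Int) (pend : List (Int × List Int))
    (blk : PySem.Dict Int (List Int)) (c : Int)
    (hnd : (pend.map Prod.fst).Nodup)
    (horig : ∀ kv ∈ pend, blk.getD kv.1 [] = kv.2) :
    ((pend.map Prod.fst).foldl (fun (st : Int × PySem.Dict Int (List Int)) rule =>
        if rule ≥ 0 ∧ rule > v then
          let blk2 := keys.foldl (fun blk rule2 =>
              if rule ≠ rule2 ∧ rule2 > v then blk.modify rule [] (fun l => l ++ [-rule2]) else blk)
            st.2
          (st.1 + ((blk2.getD rule []).length : Int), blk2)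
        else (st.1 + 1, st.2)) (c, blk)).1
    = pend.foldl (fun c kv =>
        if kv.1 ≥ 0 ∧ kv.1 > v then
          c + (kv.2.length : Int)
            + ((keys.filter (fun r2 => decide (kv.1 ≠ r2 ∧ r2 > v))).length : Int)
        else c + 1) c := by
  induction pend generalizing blk c with
  | nil => rfl
  | cons kv t ih =>
    simp only [List.map_cons, List.foldl_cons] at hnd ⊢
    obtain ⟨hnotin, hnd'⟩ := List.nodup_cons.mp hnd
    by_cases h : kv.1 ≥ 0 ∧ kv.1 > v
    · simp only [if_pos h]
      have hgd : blk.getD kv.1 [] = kv.2 := horig kv List.mem_cons_self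
      have hB2 := pv_inner_getD v kv.1 keys blk
      rw [hgd] at hB2
      have hlen : (((keys.foldl (fun blk rule2 =>
          if kv.1 ≠ rule2 ∧ rule2 > v then blk.modify kv.1 [] (fun l => l ++ [-rule2]) else blk)
          blk).getD kv.1 []).length : Int)
          = (kv.2.length : Int)
            + ((keys.filter (fun r2 => decide (kv.1 ≠ r2 ∧ r2 > v))).length : Int) := by
        rw [hB2]; simp [List.length_append]
      rw [ih _ _ hnd' ?_]
      · rw [hlen, add_assoc]
      · intro kv' hkv'
        have hne : kv'.1 ≠ kv.1 := by
          intro e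
          exact hnotin (e ▸ List.mem_map_of_mem hkv')
        rw [pv_inner_getD_ne v kv.1 kv'.1 hne keys blk]
        exact horig kv' (List.mem_cons_of_mem kv hkv')
    · simp only [if_neg h]
      exact ih _ _ hnd' (fun kv' hkv' => horig kv' (List.mem_cons_of_mem kv hkv'))

-- ===== VERDICT (by name: the statement is the Claim_ definition above) =====
theorem addUnicityRules_spec : Claim_equal_addUnicityRules := by
  intro rulesList v _hdom hpre
  unfold Spec_addUnicityRules addUnicityRules addUnicityRules_alt
  refine PySem.List.foldl_congr_mem _ _ _ _ (fun c block hblock => ?_)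
  have hnd : (block.map Prod.fst).Nodup := hpre block hblock
  have horig : ∀ kv ∈ block, (PySem.Dict.mk block).getD kv.1 [] = kv.2 := by
    intro kv hkv
    exact PySem.Dict.getD_of_mem_items (PySem.Dict.mk block) hkv hnd []
  simp only []
  rw [pv_block v (block.map Prod.fst) block (PySem.Dict.mk block) c hnd horig]
  refine PySem.List.foldl_congr_mem _ _ _ _ (fun c kv hkv => ?_)
  by_cases h : kv.1 ≥ 0 ∧ kv.1 > v
  · simp only [if_pos h]
    have h1 : ((block.map Prod.fst).count kv.1) = 1 :=
      List.count_eq_one_of_mem hnd (List.mem_map_of_mem hkv)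
    have := pv_filter_count v kv.1 h.2 (block.map Prod.fst)
    rw [this, h1]
    push_cast; ring
  · simp only [if_neg h]
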